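-- pv_equiv track=rewrite | github.com/macs30200-s22/replication-materials-LynetteDang | helper/util_network.py | construct_ind_network
-- ===== SOURCE A (Python) =====
-- def construct_ind_network(comm_network):
--     """
--     Clean up and construct a dictionary for individual legislators' connections
--
--     Inputs:
--         network: a dictionary with keys being the name of the committee and
--         values being the names of its members, all cleaned up
--     Outputs:
--         conn_network: a dictionary with keys being individual legislators, and
--         values being the list of legislators they are on at least one committee
--         with
--     """
--     network = {}
--     for comm, mems in comm_network.items():
--         list_of_legislators = comm_network[comm]
--         for mem in mems:
--             if mem not in network:
--                 network[mem] = []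
--             for l in list_of_legislators:
--                 if l != mem and l not in network[mem]:
--                     network[mem].append(l)
--     return network
-- ===== SOURCE B (Python) =====
-- def construct_ind_network(comm_network):
--     # Two passes via an inverse index: member -> rosters of their committees,
--     # then one ordered dedup per member with a seen-set (no repeated list scans).
--     member_rosters = {}
--     for comm, mems in comm_network.items():
--         for mem in mems:
--             member_rosters.setdefault(mem, []).append(mems)
--     network = {}
--     for mem, rosters in member_rosters.items():
--         seen = set()
--         neighbors = []
--         for roster in rosters:
--             for l in roster:
--                 if l != mem and l not in seen:
--                     seen.add(l)
--                     neighbors.append(l)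
--         network[mem] = neighbors
--     return network
-- ===== Notes on version B (the rewrite author's own statement) =====
-- stated objective: faster
-- what changed: A builds each member's neighbor list in one committee-major pass with a linear 'l not in network[mem]' scan per candidate; B first builds an inverse index member->rosters, then dedups each member's concatenated rosters once with a constant-time seen-set.
import Mathlib
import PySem

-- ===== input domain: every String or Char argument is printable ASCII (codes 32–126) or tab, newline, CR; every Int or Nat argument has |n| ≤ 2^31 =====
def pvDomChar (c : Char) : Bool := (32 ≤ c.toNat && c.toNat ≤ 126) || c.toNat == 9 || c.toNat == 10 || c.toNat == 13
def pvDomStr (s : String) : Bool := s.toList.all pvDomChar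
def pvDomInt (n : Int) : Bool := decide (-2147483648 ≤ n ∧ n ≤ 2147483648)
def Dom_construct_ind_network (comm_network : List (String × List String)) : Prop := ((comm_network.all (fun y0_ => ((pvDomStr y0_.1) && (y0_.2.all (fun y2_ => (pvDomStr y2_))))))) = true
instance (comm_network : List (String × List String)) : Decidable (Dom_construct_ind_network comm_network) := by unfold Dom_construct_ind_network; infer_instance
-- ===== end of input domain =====

-- B replaces A's committee-major loop (with its repeated `l not in network[mem]` list scans)
-- by an inverse index (member -> rosters of their committees) followed by one ordered
-- dedup per member using a seen-set.

-- ===== PORT A =====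
def construct_ind_network (comm_network : List (String × List String)) : List (String × List String) :=
  (comm_network.foldl (fun (network : PySem.Dict String (List String)) cm =>
    let list_of_legislators := (PySem.Dict.mk comm_network).getD cm.1 []
    cm.2.foldl (fun network mem =>
      let network := if network.contains mem then network else network.insert mem []
      list_of_legislators.foldl (fun network l =>
        if l ≠ mem ∧ l ∉ network.getD mem [] then
          network.modify mem [] (fun v => v ++ [l])
        else network) network) network) PySem.Dict.empty).items

-- ===== PORT B =====
def construct_ind_network_alt (comm_network : List (String × List String)) : List (String × List String) :=
  let member_rosters : PySem.Dict String (List (List String)) :=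
    comm_network.foldl (fun mr cm =>
      cm.2.foldl (fun mr mem => mr.modify mem [] (fun rs => rs ++ [cm.2])) mr)
      PySem.Dict.empty
  (member_rosters.items.foldl (fun (network : PySem.Dict String (List String)) pr =>
    let nb := pr.2.foldl (fun (acc : List String × PySem.Set String) roster =>
        roster.foldl (fun acc l =>
          if l ≠ pr.1 ∧ ¬ (PySem.Set.contains acc.2 l = true) then (acc.1 ++ [l], PySem.Set.add acc.2 l) else acc) acc)
      ([], PySem.Set.empty)
    network.insert pr.1 nb.1) PySem.Dict.empty).items

-- ===== PRECONDITION & SPEC =====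
-- The argument is a Python dict, whose keys are necessarily distinct; Pre_ states exactly
-- that for the association-list model (no Python-representable input is excluded).
def Pre_construct_ind_network (comm_network : List (String × List String)) : Prop :=
  (comm_network.map Prod.fst).Nodup
instance (comm_network : List (String × List String)) : Decidable (Pre_construct_ind_network comm_network) := by unfold Pre_construct_ind_network; infer_instance

def pvWitness_construct_ind_network : (List (String × List String)) :=
  [("c1", ["a", "b"]), ("c2", ["b", "c"])]

def Spec_construct_ind_network (comm_network : List (String × List String)) (out : List (String × List String)) : Prop := out = construct_ind_network_alt comm_network
instance (comm_network : List (String × List String)) (out : List (String × List String)) : Decidable (Spec_construct_ind_network comm_network out) := by unfold Spec_construct_ind_network; infer_instance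

-- ===== CLAIM (what is proved, stated in full; the proofs are below) =====
def Claim_equal_construct_ind_network : Prop := ∀ (comm_network : List (String × List String)), Dom_construct_ind_network comm_network → Pre_construct_ind_network comm_network → Spec_construct_ind_network comm_network (construct_ind_network comm_network)

-- ===== LEMMAS AND PROOFS =====

-- one append-if-new step of the shared dedup, and its fold over a roster
def pvExt1 (m : String) (v : List String) (l : String) : List String :=
  if l ≠ m ∧ l ∉ v then v ++ [l] else v
def pvExtD (m : String) (v : List String) (r : List String) : List String :=
  r.foldl (pvExt1 m) v
-- the flattened committee-major sequence of (member, roster) events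
def pvEvents (cn : List (String × List String)) : List (String × List String) :=
  cn.flatMap (fun cm => cm.2.map (fun mem => (mem, cm.2)))
-- the common closed form of both programs' output
def pvOut (cn : List (String × List String)) : List (String × List String) :=
  (PySem.Set.ofList ((pvEvents cn).map Prod.fst)).map
    (fun m => (m, ((((pvEvents cn).filter (fun e => e.1 == m)).map Prod.snd)).foldl (pvExtD m) []))

lemma pv_insert_getD_self {ν : Type} (d : PySem.Dict String ν) (k : String) (dflt : ν)
    (hn : d.keys.Nodup) (hc : d.contains k = true) : d.insert k (d.getD k dflt) = d := by
  apply PySem.Dict.ext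
  rw [PySem.Dict.items_insert_of_contains (h := hc)]
  rw [List.map_congr_left (g := id), List.map_id]
  intro p hp
  by_cases h : p.1 = k
  · have hv : d.getD k dflt = p.2 := by
      have := PySem.Dict.getD_of_mem_items d (k := p.1) (v := p.2) hp hn dflt
      rw [h] at this; exact this
    have : (k, d.getD k dflt) = p := by rw [hv, ← h]
    simp [h, this]
  · simp [h]

lemma pv_innerA (m : String) (r : List String) : ∀ (n : PySem.Dict String (List String)),
    n.keys.Nodup → n.contains m = true →
    r.foldl (fun n l => if l ≠ m ∧ l ∉ n.getD m [] then n.modify m [] (fun v => v ++ [l]) else n) n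
      = n.insert m (pvExtD m (n.getD m []) r) := by
  induction r with
  | nil =>
    intro n hn hc
    simp only [List.foldl_nil, pvExtD]
    exact (pv_insert_getD_self n m [] hn hc).symm
  | cons l r ih =>
    intro n hn hc
    simp only [List.foldl_cons]
    by_cases h : l ≠ m ∧ l ∉ n.getD m []
    · rw [if_pos h]
      have hmod : n.modify m [] (fun v => v ++ [l]) = n.insert m (n.getD m [] ++ [l]) := rfl
      rw [hmod, ih _ (PySem.Dict.nodup_keys_insert n m _ hn) (PySem.Dict.contains_insert_self n m _),
        PySem.Dict.getD_insert_self, PySem.Dict.insert_insert_self]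
      congr 1
      simp [pvExtD, pvExt1, if_pos h]
    · rw [if_neg h, ih _ hn hc]
      congr 1
      show pvExtD m (n.getD m []) r = pvExtD m (n.getD m []) (l :: r)
      simp only [pvExtD, List.foldl_cons, pvExt1, if_neg h]

lemma pv_stepA (m : String) (r : List String) (n : PySem.Dict String (List String))
    (hn : n.keys.Nodup) :
    r.foldl (fun n l => if l ≠ m ∧ l ∉ n.getD m [] then n.modify m [] (fun v => v ++ [l]) else n)
        (if n.contains m then n else n.insert m [])
      = n.insert m (pvExtD m (n.getD m []) r) := by
  by_cases hc : n.contains m = true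
  · rw [if_pos hc]; exact pv_innerA m r n hn hc
  · rw [if_neg hc]
    have hd : n.getD m [] = [] :=
      PySem.Dict.getD_of_not_contains _ _ (by simpa using hc)
    rw [pv_innerA m r _ (PySem.Dict.nodup_keys_insert n m _ hn) (PySem.Dict.contains_insert_self n m _),
      PySem.Dict.getD_insert_self, PySem.Dict.insert_insert_self, hd]

-- a fold of per-key in-place updates over an event list, started on a Nodup-keyed dict,
-- is the dict of per-key folds over each key's own events (group-by commutes with fold)
lemma pv_core {σ : Type} (u : String → σ → List String → σ) (init : σ) :
    ∀ (es : List (String × List String)) (n : PySem.Dict String σ), n.keys.Nodup →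
    es.foldl (fun n e => n.insert e.1 (u e.1 (n.getD e.1 init) e.2)) n
      = PySem.Dict.mk ((PySem.Set.update n.keys (es.map Prod.fst)).map
          (fun m => (m, es.foldl (fun v e => if e.1 = m then u m v e.2 else v) (n.getD m init)))) := by
  intro es
  induction es with
  | nil =>
    intro n hn
    simp only [List.foldl_nil, List.map_nil, PySem.Set.update_nil]
    conv_lhs => rw [show n = PySem.Dict.mk n.items from rfl]
    rw [PySem.Dict.items_eq_map_keys n hn init]
  | cons e es ih =>
    intro n hn
    simp only [List.foldl_cons, List.map_cons]
    rw [ih _ (PySem.Dict.nodup_keys_insert n e.1 _ hn)]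
    have hkeys : (n.insert e.1 (u e.1 (n.getD e.1 init) e.2)).keys = PySem.Set.add n.keys e.1 := by
      by_cases hc : n.contains e.1 = true
      · rw [PySem.Dict.keys_insert_of_contains _ _ hc]
        have hmem : e.1 ∈ n.keys := (PySem.Dict.contains_iff_mem_keys _ _).mp hc
        simp [PySem.Set.add, hmem]
      · rw [PySem.Dict.keys_insert_of_not_contains _ _ (by simpa using hc)]
        have hmem : e.1 ∉ n.keys := fun h => hc ((PySem.Dict.contains_iff_mem_keys _ _).mpr h)
        simp [PySem.Set.add, hmem]
    rw [hkeys, PySem.Set.update_cons]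
    congr 1
    apply List.map_congr_left
    intro m _
    have hg : (n.insert e.1 (u e.1 (n.getD e.1 init) e.2)).getD m init
        = if m = e.1 then u e.1 (n.getD e.1 init) e.2 else n.getD m init :=
      PySem.Dict.getD_insert ..
    rw [hg]
    by_cases hme : m = e.1
    · simp [hme]
    · simp [hme, Ne.symm hme]

lemma pv_foldl_filter {σ : Type} (m : String) (g : σ → List String → σ) :
    ∀ (es : List (String × List String)) (v : σ),
    es.foldl (fun v e => if e.1 = m then g v e.2 else v) v
      = (((es.filter (fun e => e.1 == m)).map Prod.snd)).foldl g v := by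
  intro es
  induction es with
  | nil => intro v; rfl
  | cons e es ih =>
    intro v
    by_cases h : e.1 = m
    · simp [h, ih]
    · simp [h, ih]

-- B's (neighbors, seen) pair fold with equal components stays componentwise equal
-- to A's append-if-new fold
lemma pv_pair_inner (m : String) (r : List String) : ∀ (v : List String),
    r.foldl (fun (acc : List String × PySem.Set String) l =>
        if l ≠ m ∧ ¬ (PySem.Set.contains acc.2 l = true) then (acc.1 ++ [l], PySem.Set.add acc.2 l) else acc) (v, v)
      = (pvExtD m v r, pvExtD m v r) := by
  induction r with
  | nil => intro v; rfl
  | cons l r ih =>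
    intro v
    simp only [List.foldl_cons]
    by_cases h : l ≠ m ∧ l ∉ v
    · have hc : ¬ (PySem.Set.contains (v : PySem.Set String) l = true) := by
        simpa using h.2
      rw [if_pos ⟨h.1, hc⟩]
      have hadd : PySem.Set.add (v : PySem.Set String) l = v ++ [l] := by
        simp [PySem.Set.add, h.2]
      rw [hadd, ih]
      simp only [pvExtD, List.foldl_cons, pvExt1, if_pos h]
    · have hneg : ¬ (l ≠ m ∧ ¬ (PySem.Set.contains (v : PySem.Set String) l = true)) := by
        simpa using h
      rw [if_neg hneg, ih]
      simp only [pvExtD, List.foldl_cons, pvExt1, if_neg h]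

lemma pv_pair (m : String) (rosters : List (List String)) : ∀ (v : List String),
    rosters.foldl (fun acc roster =>
        roster.foldl (fun (acc : List String × PySem.Set String) l =>
          if l ≠ m ∧ ¬ (PySem.Set.contains acc.2 l = true) then (acc.1 ++ [l], PySem.Set.add acc.2 l) else acc) acc) (v, v)
      = (rosters.foldl (pvExtD m) v, rosters.foldl (pvExtD m) v) := by
  induction rosters with
  | nil => intro v; rfl
  | cons r rosters ih =>
    intro v
    simp only [List.foldl_cons]
    rw [pv_pair_inner m r v, ih]

lemma pv_eventsA : ∀ (es : List (String × List String)) (n : PySem.Dict String (List String)),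
    n.keys.Nodup →
    es.foldl (fun n e =>
        (e.2.foldl (fun n l => if l ≠ e.1 ∧ l ∉ n.getD e.1 [] then n.modify e.1 [] (fun v => v ++ [l]) else n)
          (if n.contains e.1 then n else n.insert e.1 []))) n
      = es.foldl (fun n e => n.insert e.1 (pvExtD e.1 (n.getD e.1 []) e.2)) n := by
  intro es
  induction es with
  | nil => intro n _; rfl
  | cons e es ih =>
    intro n hn
    simp only [List.foldl_cons]
    rw [pv_stepA e.1 e.2 n hn, ih _ (PySem.Dict.nodup_keys_insert n e.1 _ hn)]

lemma pv_A_closed (cn : List (String × List String)) (hpre : (cn.map Prod.fst).Nodup) :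
    construct_ind_network cn = pvOut cn := by
  unfold construct_ind_network
  have hroster : ∀ (acc : PySem.Dict String (List String)), ∀ cm ∈ cn,
      (fun (network : PySem.Dict String (List String)) cm =>
        let list_of_legislators := (PySem.Dict.mk cn).getD cm.1 []
        cm.2.foldl (fun network mem =>
          let network := if network.contains mem then network else network.insert mem []
          list_of_legislators.foldl (fun network l =>
            if l ≠ mem ∧ l ∉ network.getD mem [] then
              network.modify mem [] (fun v => v ++ [l])
            else network) network) network) acc cm
      = ((cm.2.map (fun mem => (mem, cm.2))).foldl (fun n e =>
          (e.2.foldl (fun n l => if l ≠ e.1 ∧ l ∉ n.getD e.1 [] then n.modify e.1 [] (fun v => v ++ [l]) else n)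
            (if n.contains e.1 then n else n.insert e.1 []))) acc) := by
    intro acc cm hcm
    have hget : (PySem.Dict.mk cn).getD cm.1 [] = cm.2 := by
      apply PySem.Dict.getD_of_mem_items
      · show (cm.1, cm.2) ∈ cn
        simpa using hcm
      · simpa [PySem.Dict.keys_mk] using hpre
    simp only [hget, List.foldl_map]
  rw [PySem.List.foldl_congr_mem cn _ _ PySem.Dict.empty hroster]
  rw [← List.foldl_flatMap]
  rw [show (cn.flatMap (fun cm => cm.2.map (fun mem => (mem, cm.2)))) = pvEvents cn from rfl]
  rw [pv_eventsA (pvEvents cn) PySem.Dict.empty (by simp [PySem.Dict.keys_empty])]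
  rw [pv_core pvExtD [] (pvEvents cn) PySem.Dict.empty (by simp [PySem.Dict.keys_empty])]
  simp only [PySem.Dict.keys_empty, PySem.Set.update_nil_left, PySem.Dict.getD_empty]
  show _ = pvOut cn
  unfold pvOut
  apply congrArg PySem.Dict.items
  apply congrArg PySem.Dict.mk
  apply List.map_congr_left
  intro m _
  rw [pv_foldl_filter m (pvExtD m)]

lemma pv_secondpass (rs : List (String × List (List String))) (hnd : (rs.map Prod.fst).Nodup) :
    ((rs.foldl (fun (network : PySem.Dict String (List String)) pr =>
      network.insert pr.1 ((pr.2.foldl (fun (acc : List String × PySem.Set String) roster =>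
        roster.foldl (fun acc l =>
          if l ≠ pr.1 ∧ ¬ (PySem.Set.contains acc.2 l = true) then (acc.1 ++ [l], PySem.Set.add acc.2 l) else acc) acc)
        ([], PySem.Set.empty)).1)) PySem.Dict.empty)).items
    = rs.map (fun pr => (pr.1, pr.2.foldl (pvExtD pr.1) [])) := by
  rw [PySem.Dict.items_foldl_insert_fresh rs Prod.fst _ PySem.Dict.empty
    (fun a _ => PySem.Dict.contains_empty _) hnd]
  rw [show (PySem.Dict.empty : PySem.Dict String (List String)).items = [] from rfl, List.nil_append]
  apply List.map_congr_left
  intro pr _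
  have h := pv_pair pr.1 pr.2 []
  rw [show (([], PySem.Set.empty) : List String × PySem.Set String) = (([] : List String), ([] : List String)) from rfl]
  rw [h]

lemma pv_B_closed (cn : List (String × List String)) :
    construct_ind_network_alt cn = pvOut cn := by
  unfold construct_ind_network_alt
  have hmr : cn.foldl (fun mr cm =>
        cm.2.foldl (fun mr mem => mr.modify mem [] (fun rs => rs ++ [cm.2])) mr)
        (PySem.Dict.empty : PySem.Dict String (List (List String)))
      = PySem.Dict.mk ((PySem.Set.ofList ((pvEvents cn).map Prod.fst)).map
          (fun m => (m, ((pvEvents cn).filter (fun e => e.1 == m)).map Prod.snd))) := by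
    have hnest : cn.foldl (fun mr cm =>
          cm.2.foldl (fun mr mem => mr.modify mem [] (fun rs => rs ++ [cm.2])) mr)
          (PySem.Dict.empty : PySem.Dict String (List (List String)))
        = (pvEvents cn).foldl (fun mr e => mr.modify e.1 [] (fun rs => rs ++ [e.2]))
            PySem.Dict.empty := by
      rw [pvEvents, List.foldl_flatMap]
      simp only [List.foldl_map]
    rw [hnest]
    have hstep : (pvEvents cn).foldl (fun mr e => mr.modify e.1 [] (fun rs => rs ++ [e.2]))
          (PySem.Dict.empty : PySem.Dict String (List (List String)))
        = (pvEvents cn).foldl (fun mr e => mr.insert e.1 (mr.getD e.1 [] ++ [e.2])) PySem.Dict.empty := rfl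
    rw [hstep]
    rw [pv_core (fun _ v r => v ++ [r]) [] (pvEvents cn) PySem.Dict.empty (by simp [PySem.Dict.keys_empty])]
    simp only [PySem.Dict.keys_empty, PySem.Set.update_nil_left, PySem.Dict.getD_empty]
    apply congrArg PySem.Dict.mk
    apply List.map_congr_left
    intro m _
    rw [pv_foldl_filter m (fun v r => v ++ [r])]
    rw [show (fun (v : List (List String)) (r : List String) => v ++ [r]) = (fun acc x => acc ++ [id x]) from rfl]
    rw [PySem.List.foldl_append_singleton_eq_map id]
    simp
  rw [hmr]
  have hnd : (((PySem.Set.ofList ((pvEvents cn).map Prod.fst)).map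
      (fun m => (m, ((pvEvents cn).filter (fun e => e.1 == m)).map Prod.snd))).map Prod.fst).Nodup := by
    rw [List.map_map]
    rw [show (Prod.fst ∘ fun m => (m, ((pvEvents cn).filter (fun e => e.1 == m)).map Prod.snd)) = id from rfl,
      List.map_id]
    exact PySem.Set.nodup_ofList _
  have h2 := pv_secondpass _ hnd
  refine h2.trans ?_
  rw [List.map_map]
  apply List.map_congr_left
  intro m _
  rfl

-- ===== VERDICT (by name: the statement is the Claim_ definition above) =====
theorem construct_ind_network_spec : Claim_equal_construct_ind_network := by
  intro cn _ hpre
  unfold Spec_construct_ind_network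
  rw [pv_A_closed cn hpre, pv_B_closed cn]
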